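-- pv_equiv track=rewrite | github.com/hmc-alpaqa/metrinome | src/klee/klee_utils.py | generate_assume_loops
-- ===== SOURCE A (Python) =====
-- def generate_assume_loops(var_name, dimensions):
--     loop_str = ""
--     indent = "\t\t"
--     for d in range(dimensions):
--         loop_str += f"{indent}for (int i{d} = 0; i{d} < SIZE; i{d}++) {{\n"
--         indent += "\t"
--
--     # Adding klee_assume statement
--     indices = "[" + "][".join(f"i{d}" for d in range(dimensions)) + "]"
--     loop_str += f"{indent}klee_assume({var_name}{indices} <= MAX_VALUE);\n"
--
--     # Closing braces
--     for d in range(dimensions):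
--         indent = indent[:-1]
--         loop_str += f"{indent}}}\n"
--
--     return loop_str
-- ===== SOURCE B (Python) =====
-- def generate_assume_loops(var_name, dimensions):
--     n = max(dimensions, 0)
--     indices = "[" + "][".join(f"i{d}" for d in range(dimensions)) + "]"
--     # build inside-out: start with the innermost klee_assume line, then wrap each
--     # loop level (opener ... closing brace) around it, from innermost to outermost
--     out = ["\t" * (2 + n) + f"klee_assume({var_name}{indices} <= MAX_VALUE);\n"]
--     for d in range(n - 1, -1, -1):
--         ind = "\t" * (2 + d)
--         out = [f"{ind}for (int i{d} = 0; i{d} < SIZE; i{d}++) {{\n"] + out + [f"{ind}}}\n"]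
--     return "".join(out)
-- ===== Notes on version B (the rewrite author's own statement) =====
-- stated objective: alternative
-- what changed: Replaces A's three sequential passes (opener loop with a mutable indent grown by +=, assume line, closer loop that slices the indent back) with a single inside-out wrapping pass: start from the innermost klee_assume chunk and wrap each loop level (opener + body + closing brace, with a closed-form indent) around it from innermost to outermost, joining the chunks once at the end.
import Mathlib
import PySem

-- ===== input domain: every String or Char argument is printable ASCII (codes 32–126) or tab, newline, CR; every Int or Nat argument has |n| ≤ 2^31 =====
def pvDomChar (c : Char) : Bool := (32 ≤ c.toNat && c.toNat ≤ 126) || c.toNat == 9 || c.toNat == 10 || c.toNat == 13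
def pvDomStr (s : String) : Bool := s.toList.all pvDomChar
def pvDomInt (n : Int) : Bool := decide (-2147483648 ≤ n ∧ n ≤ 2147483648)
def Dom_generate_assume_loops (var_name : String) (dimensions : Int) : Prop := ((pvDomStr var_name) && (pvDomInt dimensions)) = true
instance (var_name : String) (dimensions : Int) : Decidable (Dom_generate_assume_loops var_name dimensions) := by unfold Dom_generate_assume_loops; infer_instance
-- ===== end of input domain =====

-- B replaces A's three sequential passes (mutable indent grown then sliced back) with one
-- inside-out wrapping pass: the innermost klee_assume chunk is wrapped by each loop level
-- from innermost to outermost, and the chunks are joined once at the end.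

-- ===== PORT A =====
def generate_assume_loops (var_name : String) (dimensions : Int) : String :=
  -- first pass: accumulate (loop_str, indent) over range(dimensions)
  let st := (PySem.List.pyRange 0 dimensions 1).foldl
    (fun (st : String × String) d =>
      (st.1 ++ st.2 ++ "for (int i" ++ PySem.Int.toStr d ++ " = 0; i" ++ PySem.Int.toStr d
         ++ " < SIZE; i" ++ PySem.Int.toStr d ++ "++) {\n",
       st.2 ++ "\t")) ("", "\t\t")
  let indices := "[" ++ PySem.Str.join "]["
      ((PySem.List.pyRange 0 dimensions 1).map (fun d => "i" ++ PySem.Int.toStr d)) ++ "]"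
  let loop1 := st.1 ++ st.2 ++ "klee_assume(" ++ var_name ++ indices ++ " <= MAX_VALUE);\n"
  -- third pass: loop variable unused, state is (indent, loop_str); indent[:-1] is Str.slice … (some (-1))
  let st2 := (PySem.List.pyRange 0 dimensions 1).foldl
    (fun (st : String × String) _ =>
      let ind := PySem.Str.slice st.1 none (some (-1))
      (ind, st.2 ++ ind ++ "}\n")) (st.2, loop1)
  st2.2

-- ===== PORT B =====
-- "\t" * k, hand port (exact: replicate of k clamped at 0, as Python's str * int)
def tabsI (k : Int) : String := String.ofList (List.replicate k.toNat '\t')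

def generate_assume_loops_alt (var_name : String) (dimensions : Int) : String :=
  let n := max dimensions 0
  let indices := "[" ++ PySem.Str.join "]["
      ((PySem.List.pyRange 0 dimensions 1).map (fun d => "i" ++ PySem.Int.toStr d)) ++ "]"
  -- inside-out wrap over d = n-1, …, 0, on a list of chunks
  let out := (PySem.List.pyRange (n - 1) (-1) (-1)).foldl
    (fun (out : List String) d =>
      let ind := tabsI (2 + d)
      [ind ++ "for (int i" ++ PySem.Int.toStr d ++ " = 0; i" ++ PySem.Int.toStr d
         ++ " < SIZE; i" ++ PySem.Int.toStr d ++ "++) {\n"] ++ out ++ [ind ++ "}\n"])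
    [tabsI (2 + n) ++ "klee_assume(" ++ var_name ++ indices ++ " <= MAX_VALUE);\n"]
  PySem.Str.join "" out

-- ===== PRECONDITION & SPEC =====
def Spec_generate_assume_loops (var_name : String) (dimensions : Int) (out : String) : Prop := out = generate_assume_loops_alt var_name dimensions
instance (var_name : String) (dimensions : Int) (out : String) : Decidable (Spec_generate_assume_loops var_name dimensions out) := by unfold Spec_generate_assume_loops; infer_instance

-- ===== CLAIM (what is proved, stated in full; the proofs are below) =====
def Claim_equal_generate_assume_loops : Prop := ∀ (var_name : String) (dimensions : Int), Dom_generate_assume_loops var_name dimensions → Spec_generate_assume_loops var_name dimensions (generate_assume_loops var_name dimensions)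

-- ===== LEMMAS AND PROOFS =====

-- proof-side bridge: the nested block for levels d..dimensions-1 at the given indent
def emitLoops (var_name indices : String) (dimensions : Int) (d : Int) (indent : String) : String :=
  if _h : d < dimensions then
    indent ++ "for (int i" ++ PySem.Int.toStr d ++ " = 0; i" ++ PySem.Int.toStr d
      ++ " < SIZE; i" ++ PySem.Int.toStr d ++ "++) {\n"
      ++ emitLoops var_name indices dimensions (d + 1) (indent ++ "\t")
      ++ indent ++ "}\n"
  else
    indent ++ "klee_assume(" ++ var_name ++ indices ++ " <= MAX_VALUE);\n"
termination_by (dimensions - d).toNat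
decreasing_by omega

-- the closing-brace step of A, as a function of the state (element is ignored)
def closeStep (st : String × String) : String × String :=
  let ind := PySem.Str.slice st.1 none (some (-1))
  (ind, st.2 ++ ind ++ "}\n")

theorem foldl_close_eq_iterate (xs : List Int) (init : String × String) :
    xs.foldl
      (fun (st : String × String) _ =>
        let ind := PySem.Str.slice st.1 none (some (-1))
        (ind, st.2 ++ ind ++ "}\n")) init = closeStep^[xs.length] init := by
  induction xs generalizing init with
  | nil => rfl
  | cons x xs ih => simpa [List.foldl_cons, closeStep, Function.iterate_succ_apply] using ih _

theorem slice_append_tab (s : String) :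
    PySem.Str.slice (s ++ "\t") none (some (-1)) = s := by
  rw [← String.toList_inj, PySem.Str.slice_to_neg_one]
  simp

theorem closeStep_tab (ind L : String) :
    closeStep (ind ++ "\t", L) = (ind, L ++ ind ++ "}\n") := by
  simp [closeStep, slice_append_tab]

-- A-side invariant: opening fold from (s, ind) followed by the assume line and
-- (dimensions-d) closing steps produces s ++ emitLoops … d ind
theorem main_lemma (var_name indices : String) (dimensions : Int) :
    ∀ (fuel : Nat) (d : Int) (s ind : String), (dimensions - d).toNat = fuel →
    (closeStep^[fuel]
      (((PySem.List.pyRange d dimensions 1).foldl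
          (fun (st : String × String) d =>
            (st.1 ++ st.2 ++ "for (int i" ++ PySem.Int.toStr d ++ " = 0; i" ++ PySem.Int.toStr d
               ++ " < SIZE; i" ++ PySem.Int.toStr d ++ "++) {\n",
             st.2 ++ "\t")) (s, ind)).2,
        ((PySem.List.pyRange d dimensions 1).foldl
          (fun (st : String × String) d =>
            (st.1 ++ st.2 ++ "for (int i" ++ PySem.Int.toStr d ++ " = 0; i" ++ PySem.Int.toStr d
               ++ " < SIZE; i" ++ PySem.Int.toStr d ++ "++) {\n",
             st.2 ++ "\t")) (s, ind)).1
          ++ ((PySem.List.pyRange d dimensions 1).foldl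
          (fun (st : String × String) d =>
            (st.1 ++ st.2 ++ "for (int i" ++ PySem.Int.toStr d ++ " = 0; i" ++ PySem.Int.toStr d
               ++ " < SIZE; i" ++ PySem.Int.toStr d ++ "++) {\n",
             st.2 ++ "\t")) (s, ind)).2
          ++ "klee_assume(" ++ var_name ++ indices ++ " <= MAX_VALUE);\n"))
      = (ind, s ++ emitLoops var_name indices dimensions d ind) := by
  intro fuel
  induction fuel with
  | zero =>
    intro d s ind h
    have hle : dimensions ≤ d := by omega
    rw [PySem.List.pyRange_one_eq_nil hle]
    rw [emitLoops]
    rw [dif_neg (by omega)]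
    simp [String.append_assoc]
  | succ n ih =>
    intro d s ind h
    have hlt : d < dimensions := by omega
    rw [PySem.List.pyRange_one_cons hlt]
    simp only [List.foldl_cons]
    rw [Function.iterate_succ_apply']
    rw [ih (d + 1)
        (s ++ ind ++ "for (int i" ++ PySem.Int.toStr d ++ " = 0; i" ++ PySem.Int.toStr d
               ++ " < SIZE; i" ++ PySem.Int.toStr d ++ "++) {\n")
        (ind ++ "\t") (by omega)]
    rw [closeStep_tab]
    conv_rhs => rw [emitLoops]
    rw [dif_pos hlt]
    simp [String.append_assoc]

-- join with empty separator concatenates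
theorem join_empty_nil : PySem.Str.join "" ([] : List String) = "" := by
  rw [← String.toList_inj]; simp [PySem.Str.toList_join, PySem.Chars.join_nil]

theorem join_empty_singleton (x : String) : PySem.Str.join "" [x] = x := by
  rw [← String.toList_inj]; simp [PySem.Str.toList_join, PySem.Chars.join_singleton]

theorem join_empty_cons (x : String) (l : List String) :
    PySem.Str.join "" (x :: l) = x ++ PySem.Str.join "" l := by
  cases l with
  | nil => rw [join_empty_nil, join_empty_singleton]; rw [← String.toList_inj]; simp
  | cons y ys =>
    rw [← String.toList_inj]
    simp [PySem.Str.toList_join, PySem.Chars.join_cons_cons]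

theorem join_empty_append (l1 l2 : List String) :
    PySem.Str.join "" (l1 ++ l2) = PySem.Str.join "" l1 ++ PySem.Str.join "" l2 := by
  induction l1 with
  | nil => simp [join_empty_nil]
  | cons x xs ih => simp [join_empty_cons, ih, String.append_assoc]

theorem tabsI_succ (k : Int) (hk : 0 ≤ k) : tabsI k ++ "\t" = tabsI (k + 1) := by
  rw [← String.toList_inj]
  have : (k + 1).toNat = k.toNat + 1 := by omega
  simp [tabsI, this, List.replicate_succ']

theorem tabsI_two : tabsI 2 = "\t\t" := by
  rw [← String.toList_inj]
  simp [tabsI]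

-- B-side invariant: wrapping the levels k-1 … 0 around a chunk list whose join is the
-- nested block for level k yields the nested block for level 0
theorem wrap_lemma (var_name indices : String) (dimensions : Int) :
    ∀ (fuel : Nat) (k : Int) (L : List String), 0 ≤ k → k ≤ dimensions → k.toNat = fuel →
    PySem.Str.join "" L = emitLoops var_name indices dimensions k (tabsI (2 + k)) →
    PySem.Str.join ""
      ((PySem.List.pyRange (k - 1) (-1) (-1)).foldl
        (fun (out : List String) d =>
          let ind := tabsI (2 + d)
          [ind ++ "for (int i" ++ PySem.Int.toStr d ++ " = 0; i" ++ PySem.Int.toStr d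
             ++ " < SIZE; i" ++ PySem.Int.toStr d ++ "++) {\n"] ++ out ++ [ind ++ "}\n"]) L)
      = emitLoops var_name indices dimensions 0 (tabsI 2) := by
  intro fuel
  induction fuel with
  | zero =>
    intro k L hk0 _ hfuel hjoin
    have hk : k = 0 := by omega
    subst hk
    rw [PySem.List.pyRange_neg_one_eq_nil (by omega)]
    simpa using hjoin
  | succ n ih =>
    intro k L hk0 hkd hfuel hjoin
    have hpos : 0 < k := by omega
    have hcons : PySem.List.pyRange (k - 1) (-1) (-1)
        = (k - 1) :: PySem.List.pyRange (k - 1 - 1) (-1) (-1) :=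
      PySem.List.pyRange_neg_one_cons (by omega)
    rw [hcons]
    simp only [List.foldl_cons]
    refine ih (k - 1) _ (by omega) (by omega) (by omega) ?_
    rw [join_empty_append, join_empty_append, join_empty_singleton, join_empty_singleton, hjoin]
    conv_rhs => rw [emitLoops]
    rw [dif_pos (by omega : k - 1 < dimensions)]
    rw [tabsI_succ _ (by omega)]
    have h1 : 2 + (k - 1) + 1 = 2 + k := by ring
    have h2 : k - 1 + 1 = k := by ring
    rw [h1, h2]
    simp [String.append_assoc]

-- the alt port equals the nested block at the top level
theorem alt_eq_emit (var_name : String) (dimensions : Int) :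
    generate_assume_loops_alt var_name dimensions
      = emitLoops var_name
          ("[" ++ PySem.Str.join "]["
            ((PySem.List.pyRange 0 dimensions 1).map (fun d => "i" ++ PySem.Int.toStr d)) ++ "]")
          dimensions 0 "\t\t" := by
  unfold generate_assume_loops_alt
  simp only []
  set indices := "[" ++ PySem.Str.join "]["
      ((PySem.List.pyRange 0 dimensions 1).map (fun d => "i" ++ PySem.Int.toStr d)) ++ "]" with hidx
  rcases le_or_gt 0 dimensions with hpos | hneg
  · have hmax : max dimensions 0 = dimensions := by omega
    rw [hmax]
    rw [← tabsI_two]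
    refine wrap_lemma var_name indices dimensions dimensions.toNat dimensions _ hpos le_rfl rfl ?_
    rw [join_empty_singleton]
    rw [emitLoops, dif_neg (by omega)]
  · have hmax : max dimensions 0 = 0 := by omega
    rw [hmax]
    rw [show (0:Int) - 1 = -1 from rfl, PySem.List.pyRange_neg_one_eq_nil (by omega)]
    simp only [List.foldl_nil]
    rw [join_empty_singleton]
    rw [emitLoops, dif_neg (by omega)]
    rw [show (2:Int) + 0 = 2 from rfl, tabsI_two]

-- ===== VERDICT (by name: the statement is the Claim_ definition above) =====
theorem generate_assume_loops_spec : Claim_equal_generate_assume_loops := by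
  intro var_name dimensions _
  unfold Spec_generate_assume_loops generate_assume_loops
  simp only []
  rw [foldl_close_eq_iterate]
  have := main_lemma var_name
    ("[" ++ PySem.Str.join "]["
      ((PySem.List.pyRange 0 dimensions 1).map (fun d => "i" ++ PySem.Int.toStr d)) ++ "]")
    dimensions ((PySem.List.pyRange 0 dimensions 1).length) 0 "" "\t\t"
    (by rw [PySem.List.length_pyRange_one])
  rw [this, alt_eq_emit]
  simp
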